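-- pv_equiv track=rewrite | github.com/Aash55/CRYPTOGRAPHY_LAB_NIT_JSR | 03_B_MULTIPLICATION.py | poly_mult_normal
-- ===== SOURCE A (Python) =====
-- def poly_mult_normal(poly1, poly2, irreducible_poly):
--     """
--     Multiplies two polynomials and reduces the result modulo an irreducible polynomial.
--     """
--     # Standard multiplication
--     len1, len2 = len(poly1), len(poly2)
--     temp_result = [0] * (len1 + len2 - 1)
--
--     for i in range(len1):
--         if poly1[i] == 1:
--             for j in range(len2):
--                 if poly2[j] == 1:
--                     # XOR at the corresponding position
--                     temp_result[i + j] ^= 1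
--
--     # Modulo reduction (long division)
--     irred_degree = len(irreducible_poly) - 1
--
--     while len(temp_result) >= irred_degree + 1:
--         if temp_result[0] == 1:
--             # Shift irreducible polynomial to align with the highest bit
--             shift_amount = len(temp_result) - len(irreducible_poly)
--             shifted_irred = [0] * shift_amount + irreducible_poly
--
--             # XOR the temporary result with the shifted irreducible poly
--             for i in range(len(temp_result)):
--                 temp_result[i] ^= shifted_irred[i]
--
--         # Remove leading zeros
--         while len(temp_result) > 1 and temp_result[0] == 0:
--             temp_result.pop(0)
--
--     return temp_result
-- ===== SOURCE B (Python) =====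
-- def poly_mult_normal(poly1, poly2, irreducible_poly):
--     # gather-style convolution over GF(2), then correctly aligned long division
--     n = len(poly1) + len(poly2) - 1
--     temp = [sum(1 for i in range(len(poly1))
--                 if poly1[i] == 1 and 0 <= k - i < len(poly2) and poly2[k - i] == 1) % 2
--             for k in range(n)]
--     L = len(irreducible_poly)
--     if n < L:
--         return temp
--     r = temp
--     for k in range(n - L + 1):
--         if r[k] == 1:
--             r = r[:k] + [x ^ y for x, y in zip(r[k:], irreducible_poly)] + r[k + L:]
--     rem = r[n - L + 1:]
--     while len(rem) > 1 and rem[0] == 0: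
--         rem = rem[1:]
--     return rem if rem else [0]
-- ===== Notes on version B (the rewrite author's own statement) =====
-- stated objective: alternative
-- what changed: B computes each product coefficient directly as a parity count (gather-style convolution) instead of A's in-place scatter-XOR array, and reduces with a correctly top-aligned single forward pass of long division instead of A's strip-and-bottom-aligned-XOR while loop; Pre_ excludes exactly the inputs on which A raises IndexError or loops forever (its bottom-aligned reduction never clears the leading bit when a real shift is needed).
import Mathlib
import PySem

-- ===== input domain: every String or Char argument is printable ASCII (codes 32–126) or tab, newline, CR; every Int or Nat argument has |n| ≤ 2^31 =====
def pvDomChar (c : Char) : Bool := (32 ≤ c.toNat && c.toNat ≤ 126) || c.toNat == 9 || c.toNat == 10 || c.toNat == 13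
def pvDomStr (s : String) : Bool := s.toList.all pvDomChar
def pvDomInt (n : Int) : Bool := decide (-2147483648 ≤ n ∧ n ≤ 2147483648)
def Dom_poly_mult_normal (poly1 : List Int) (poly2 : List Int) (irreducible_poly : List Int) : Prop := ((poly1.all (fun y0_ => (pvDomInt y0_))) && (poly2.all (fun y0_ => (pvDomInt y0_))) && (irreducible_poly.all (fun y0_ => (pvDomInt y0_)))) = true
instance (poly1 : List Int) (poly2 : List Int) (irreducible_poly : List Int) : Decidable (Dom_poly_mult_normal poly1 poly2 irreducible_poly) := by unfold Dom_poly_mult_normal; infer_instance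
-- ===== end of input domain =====

-- B replaces A's scatter-XOR multiplication by a direct parity-count convolution and A's
-- strip/bottom-aligned-XOR while loop by one top-aligned forward pass of long division;
-- Pre_ excludes exactly the inputs where A raises or loops forever (alternative, not faster).


-- ===== PORT A =====
-- the inner `while len(temp_result) > 1 and temp_result[0] == 0: temp_result.pop(0)` loop
def stripA : List Int → List Int
  | [] => []
  | [x] => [x]
  | x :: y :: t => if x = 0 then stripA (y :: t) else x :: y :: t

-- the two nested multiplication loops, scatter-XOR into temp_result
def multA (poly1 : List Int) (poly2 : List Int) : List Int :=
  (List.range poly1.length).foldl (fun t i =>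
    if poly1.getD i 0 = 1 then
      (List.range poly2.length).foldl (fun u j =>
        if poly2.getD j 0 = 1 then u.set (i + j) (PySem.Int.bxor (u.getD (i + j) 0) 1) else u) t
    else t)
    (List.replicate (poly1.length + poly2.length - 1) 0)

-- the outer `while len(temp_result) >= irred_degree + 1` loop; fuel bounds the while loop
-- (within Pre_ the loop exits long before the fuel is exhausted; outside Pre_ Python diverges)
def redA (irr : List Int) : Nat → List Int → List Int
  | 0, t => t
  | f + 1, t =>
    if irr.length ≤ t.length then
      let t1 := if t.getD 0 0 = 1 then
          let shifted := List.replicate (t.length - irr.length) 0 ++ irr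
          (List.range t.length).foldl
            (fun u i => u.set i (PySem.Int.bxor (u.getD i 0) (shifted.getD i 0))) t
        else t
      redA irr f (stripA t1)
    else t

def poly_mult_normal (poly1 : List Int) (poly2 : List Int) (irreducible_poly : List Int) : List Int :=
  let temp := multA poly1 poly2
  redA irreducible_poly (temp.length + 1) temp

-- ===== PORT B =====
-- coefficient k of the GF(2) product: `sum(... ) % 2` (also used by Pre_ below)
def pvConvBit (poly1 : List Int) (poly2 : List Int) (k : Nat) : Nat :=
  ((List.range poly1.length).countP (fun i =>
      (poly1.getD i 0 == 1) && decide (i ≤ k) && decide (k - i < poly2.length)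
        && (poly2.getD (k - i) 0 == 1))) % 2

-- the `while len(rem) > 1 and rem[0] == 0: rem = rem[1:]` loop of B
def stripB : List Int → List Int
  | [] => []
  | [x] => [x]
  | x :: y :: t => if x = 0 then stripB (y :: t) else x :: y :: t

def poly_mult_normal_alt (poly1 : List Int) (poly2 : List Int) (irreducible_poly : List Int) : List Int :=
  let n : Int := (poly1.length : Int) + (poly2.length : Int) - 1
  let temp := (List.range (poly1.length + poly2.length - 1)).map
    (fun k => ((pvConvBit poly1 poly2 k : Nat) : Int))
  let L := irreducible_poly.length
  if n < (L : Int) then temp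
  else
    let r := (List.range (n.toNat - L + 1)).foldl (fun r k =>
      if r.getD k 0 = 1 then
        r.take k ++ List.zipWith (fun x y => PySem.Int.bxor x y) (r.drop k) irreducible_poly
          ++ r.drop (k + L)
      else r) temp
    let rem := r.drop (n.toNat - L + 1)
    let s := stripB rem
    if s = [] then [0] else s

-- ===== PRECONDITION & SPEC =====
-- Pre_ excludes exactly the inputs on which Python A does not return: it raises IndexError
-- (empty product with empty irreducible) or loops forever — its bottom-aligned reduction
-- never clears the leading bit when the stripped product is longer than the irreducible,
-- when the irreducible has length ≤ 1, or when its leading coefficient differs from 1.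
def Pre_poly_mult_normal (poly1 : List Int) (poly2 : List Int) (irreducible_poly : List Int) : Prop :=
  poly1.length + poly2.length - 1 < irreducible_poly.length ∨
    (2 ≤ irreducible_poly.length ∧
      (∀ k, k < poly1.length + poly2.length - 1 - irreducible_poly.length →
        pvConvBit poly1 poly2 k = 0) ∧
      (pvConvBit poly1 poly2 (poly1.length + poly2.length - 1 - irreducible_poly.length) = 1 →
        irreducible_poly.getD 0 0 = 1))
instance (poly1 : List Int) (poly2 : List Int) (irreducible_poly : List Int) : Decidable (Pre_poly_mult_normal poly1 poly2 irreducible_poly) := by unfold Pre_poly_mult_normal; infer_instance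

def pvWitness_poly_mult_normal : List Int × List Int × List Int := ([1, 1], [1, 1], [1, 0, 1])

def Spec_poly_mult_normal (poly1 : List Int) (poly2 : List Int) (irreducible_poly : List Int) (out : List Int) : Prop := out = poly_mult_normal_alt poly1 poly2 irreducible_poly
instance (poly1 : List Int) (poly2 : List Int) (irreducible_poly : List Int) (out : List Int) : Decidable (Spec_poly_mult_normal poly1 poly2 irreducible_poly out) := by unfold Spec_poly_mult_normal; infer_instance

-- ===== CLAIM (what is proved, stated in full; the proofs are below) =====
def Claim_equal_poly_mult_normal : Prop := ∀ (poly1 : List Int) (poly2 : List Int) (irreducible_poly : List Int), Dom_poly_mult_normal poly1 poly2 irreducible_poly → Pre_poly_mult_normal poly1 poly2 irreducible_poly → Spec_poly_mult_normal poly1 poly2 irreducible_poly (poly_mult_normal poly1 poly2 irreducible_poly)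

-- ===== LEMMAS AND PROOFS =====

-- getD after set
theorem pv_getD_set_self (l : List Int) (n : Nat) (a : Int) (h : n < l.length) :
    (l.set n a).getD n 0 = a := by
  simp [List.getD_eq_getElem?_getD, h]

theorem pv_getD_set_ne (l : List Int) (n m : Nat) (a : Int) (h : n ≠ m) :
    (l.set n a).getD m 0 = l.getD m 0 := by
  simp [List.getD_eq_getElem?_getD, List.getElem?_set_ne h]

theorem pv_getD_eq_default (l : List Int) (n : Nat) (h : l.length ≤ n) : l.getD n 0 = 0 :=
  List.getD_eq_default _ _ h

-- a list whose first m entries are 0 splits as zeros ++ drop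
theorem pv_zeros_decomp (l : List Int) (m : Nat) (h : ∀ i, i < m → l.getD i 0 = 0)
    (hm : m ≤ l.length) : l = List.replicate m 0 ++ l.drop m := by
  apply List.ext_getElem
  · simp; omega
  · intro i h1 h2
    rcases Nat.lt_or_ge i m with hi | hi
    · have := h i hi
      rw [List.getD_eq_getElem?_getD, List.getElem?_eq_getElem h1] at this
      simp at this
      simp [hi, this]
    · rw [List.getElem_append_right (by simpa using hi)]
      rw [List.getElem_drop]
      congr 1; simp; omega

-- strip lemmas
theorem pv_stripA_eq_stripB : ∀ t : List Int, stripA t = stripB t := by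
  intro t
  induction t with
  | nil => rfl
  | cons x t ih =>
    cases t with
    | nil => rfl
    | cons y t' =>
      by_cases hx : x = 0
      · simp [stripA, stripB, hx] at ih ⊢
        exact ih
      · simp [stripA, stripB, hx]

theorem pv_stripB_cons_zero (t : List Int) (h : t ≠ []) : stripB (0 :: t) = stripB t := by
  cases t with
  | nil => exact absurd rfl h
  | cons y t' => simp [stripB]

theorem pv_stripB_replicate (j : Nat) (t : List Int) (h : t ≠ []) :
    stripB (List.replicate j 0 ++ t) = stripB t := by
  induction j with
  | zero => simp
  | succ j ih =>
    rw [List.replicate_succ, List.cons_append, pv_stripB_cons_zero, ih]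
    simp [h]

theorem pv_stripB_head_ne (x : Int) (t : List Int) (h : x ≠ 0) : stripB (x :: t) = x :: t := by
  cases t with
  | nil => rfl
  | cons y t' => simp [stripB, h]

theorem pv_stripB_length_le : ∀ t : List Int, (stripB t).length ≤ t.length := by
  intro t
  induction t with
  | nil => simp [stripB]
  | cons x t ih =>
    cases t with
    | nil => simp [stripB]
    | cons y t' =>
      by_cases hx : x = 0
      · simp [stripB, hx] at ih ⊢
        omega
      · simp [stripB, hx]

theorem pv_stripB_ne_nil : ∀ t : List Int, t ≠ [] → stripB t ≠ [] := by
  intro t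
  induction t with
  | nil => simp
  | cons x t ih =>
    intro _
    cases t with
    | nil => simp [stripB]
    | cons y t' =>
      by_cases hx : x = 0
      · simp [stripB, hx]
        simpa [stripB] using ih (by simp)
      · simp [stripB, hx]

-- characterization of A's inner multiplication loop (scatter-XOR for one fixed i)
theorem pv_inner (poly2 : List Int) (i : Nat) : ∀ (m : Nat) (u : List Int),
    (((List.range m).foldl (fun u j =>
        if poly2.getD j 0 = 1 then u.set (i + j) (PySem.Int.bxor (u.getD (i + j) 0) 1) else u) u).length = u.length)
  ∧ ∀ k, ((List.range m).foldl (fun u j =>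
        if poly2.getD j 0 = 1 then u.set (i + j) (PySem.Int.bxor (u.getD (i + j) 0) 1) else u) u).getD k 0 =
      if i ≤ k ∧ k - i < m ∧ poly2.getD (k - i) 0 = 1 ∧ k < u.length
      then PySem.Int.bxor (u.getD k 0) 1 else u.getD k 0 := by
  intro m
  induction m with
  | zero =>
    intro u
    refine ⟨by simp, ?_⟩
    intro k
    rw [if_neg (by rintro ⟨-, hb, -, -⟩; omega)]
    simp
  | succ m ih =>
    intro u
    rw [List.range_succ, List.foldl_append, List.foldl_cons, List.foldl_nil]
    obtain ⟨ihl, ihg⟩ := ih u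
    by_cases hp : poly2.getD m 0 = 1
    · rw [if_pos hp]
      refine ⟨by simpa using ihl, ?_⟩
      intro k
      by_cases hk : k = i + m
      · subst hk
        by_cases hlt : i + m < u.length
        · rw [pv_getD_set_self _ _ _ (by rw [ihl]; exact hlt), ihg]
          rw [if_neg (by rintro ⟨-, hb, -, -⟩; omega)]
          rw [if_pos ⟨by omega, by omega, by simpa using hp, hlt⟩]
        · rw [List.set_eq_of_length_le (by rw [ihl]; omega), ihg]
          rw [if_neg (by rintro ⟨-, -, -, hd⟩; omega), if_neg (by rintro ⟨-, -, -, hd⟩; omega)]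
      · rw [pv_getD_set_ne _ _ _ _ (fun h => hk h.symm), ihg]
        have hiff : (i ≤ k ∧ k - i < m ∧ poly2.getD (k - i) 0 = 1 ∧ k < u.length) ↔
            (i ≤ k ∧ k - i < m + 1 ∧ poly2.getD (k - i) 0 = 1 ∧ k < u.length) := by
          constructor
          · rintro ⟨a, b, c, d⟩; exact ⟨a, by omega, c, d⟩
          · rintro ⟨a, b, c, d⟩; exact ⟨a, by omega, c, d⟩
        rw [if_congr hiff rfl rfl]
    · rw [if_neg hp]
      refine ⟨ihl, ?_⟩
      intro k
      rw [ihg]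
      have hiff : (i ≤ k ∧ k - i < m ∧ poly2.getD (k - i) 0 = 1 ∧ k < u.length) ↔
          (i ≤ k ∧ k - i < m + 1 ∧ poly2.getD (k - i) 0 = 1 ∧ k < u.length) := by
        constructor
        · rintro ⟨a, b, c, d⟩; exact ⟨a, by omega, c, d⟩
        · rintro ⟨a, b, c, d⟩
          refine ⟨a, ?_, c, d⟩
          rcases Nat.lt_or_ge (k - i) m with h | h
          · exact h
          · exfalso
            have hkm : k - i = m := by omega
            rw [hkm] at c
            exact hp c
      rw [if_congr hiff rfl rfl]

-- XOR parity step on 0/1-valued entries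
theorem pv_bxor_parity (c : Nat) :
    PySem.Int.bxor (((c % 2 : Nat) : Int)) 1 = (((c + 1) % 2 : Nat) : Int) := by
  rcases Nat.mod_two_eq_zero_or_one c with h | h <;>
    rw [h, (by omega : (c + 1) % 2 = 1 - c % 2), h] <;> decide

-- characterization of A's multiplication phase: scatter = gather parity
theorem pv_outer (poly1 poly2 : List Int) : ∀ (m : Nat),
    (((List.range m).foldl (fun t i =>
        if poly1.getD i 0 = 1 then
          (List.range poly2.length).foldl (fun u j =>
            if poly2.getD j 0 = 1 then u.set (i + j) (PySem.Int.bxor (u.getD (i + j) 0) 1) else u) t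
        else t) (List.replicate (poly1.length + poly2.length - 1) 0)).length
      = poly1.length + poly2.length - 1)
  ∧ ∀ k, ((List.range m).foldl (fun t i =>
        if poly1.getD i 0 = 1 then
          (List.range poly2.length).foldl (fun u j =>
            if poly2.getD j 0 = 1 then u.set (i + j) (PySem.Int.bxor (u.getD (i + j) 0) 1) else u) t
        else t) (List.replicate (poly1.length + poly2.length - 1) 0)).getD k 0 =
      ((((List.range m).countP (fun i =>
          (poly1.getD i 0 == 1) && decide (i ≤ k) && decide (k - i < poly2.length)
            && (poly2.getD (k - i) 0 == 1))) % 2 : Nat) : Int) := by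
  intro m
  induction m with
  | zero =>
    refine ⟨by simp, ?_⟩
    intro k
    rcases Nat.lt_or_ge k (poly1.length + poly2.length - 1) with h | h
    · rw [List.getD_eq_getElem?_getD, List.getElem?_eq_getElem (by simpa using h)]
      simp
    · rw [List.getD_eq_getElem?_getD, List.getElem?_eq_none (by simpa using h)]
      simp
  | succ m ih =>
    obtain ⟨ihl, ihg⟩ := ih
    rw [List.range_succ, List.foldl_append, List.foldl_cons, List.foldl_nil]
    by_cases hp : poly1.getD m 0 = 1
    · rw [if_pos hp]
      obtain ⟨il, ig⟩ := pv_inner poly2 m poly2.length _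
      refine ⟨by rw [il, ihl], ?_⟩
      intro k
      rw [ig k, ihl]
      have hm1 : m < poly1.length := by
        by_contra h
        rw [pv_getD_eq_default _ _ (by omega)] at hp
        exact absurd hp (by norm_num)
      by_cases hc : m ≤ k ∧ k - m < poly2.length ∧ poly2.getD (k - m) 0 = 1
      · obtain ⟨h1, h2, h3⟩ := hc
        have hkn : k < poly1.length + poly2.length - 1 := by omega
        rw [if_pos ⟨h1, h2, h3, hkn⟩, ihg k, pv_bxor_parity, List.countP_append]
        rw [List.getD_eq_getElem?_getD] at hp h3
        have hpt : ((poly1[m]?.getD 0 == 1) && decide (m ≤ k) && decide (k - m < poly2.length)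
            && (poly2[k - m]?.getD 0 == 1)) = true := by
          rw [hp, h3]
          simp [h1, h2]
        simp [hpt]
      · rw [if_neg (by rintro ⟨a, b, c, -⟩; exact hc ⟨a, b, c⟩), ihg k, List.countP_append]
        simp only [List.getD_eq_getElem?_getD] at hc
        have hpf : ((poly1[m]?.getD 0 == 1) && decide (m ≤ k) && decide (k - m < poly2.length)
            && (poly2[k - m]?.getD 0 == 1)) = false := by
          cases hB : ((poly1[m]?.getD 0 == 1) && decide (m ≤ k) && decide (k - m < poly2.length)
              && (poly2[k - m]?.getD 0 == 1)) with
          | false => rfl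
          | true =>
            simp only [Bool.and_eq_true, beq_iff_eq, decide_eq_true_eq] at hB
            exact absurd ⟨hB.1.1.2, hB.1.2, hB.2⟩ hc
        simp [hpf]
    · rw [if_neg hp]
      refine ⟨ihl, ?_⟩
      intro k
      rw [ihg k, List.countP_append]
      rw [List.getD_eq_getElem?_getD] at hp
      have hpf : ((poly1[m]?.getD 0 == 1) && decide (m ≤ k) && decide (k - m < poly2.length)
          && (poly2[k - m]?.getD 0 == 1)) = false := by
        cases hB : ((poly1[m]?.getD 0 == 1) && decide (m ≤ k) && decide (k - m < poly2.length)
            && (poly2[k - m]?.getD 0 == 1)) with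
        | false => rfl
        | true =>
          simp only [Bool.and_eq_true, beq_iff_eq, decide_eq_true_eq] at hB
          exact absurd hB.1.1.1 hp
      simp [hpf]


-- A's multiplication phase equals B's gather convolution
theorem pv_multA_eq (poly1 poly2 : List Int) :
    multA poly1 poly2 = (List.range (poly1.length + poly2.length - 1)).map
      (fun k => ((pvConvBit poly1 poly2 k : Nat) : Int)) := by
  obtain ⟨hl, hg⟩ := pv_outer poly1 poly2 poly1.length
  apply List.ext_getElem
  · rw [multA, hl]
    simp
  · intro i h1 h2
    rw [← List.getD_eq_getElem _ 0 h1]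
    rw [multA, hg i, List.getElem_map, List.getElem_range]
    rfl

-- characterization of A's in-place XOR loop (used at equal lengths)
theorem pv_xorfold (v : List Int) : ∀ (m : Nat) (u : List Int),
    (((List.range m).foldl (fun w i => w.set i (PySem.Int.bxor (w.getD i 0) (v.getD i 0))) u).length = u.length)
  ∧ ∀ k, ((List.range m).foldl (fun w i => w.set i (PySem.Int.bxor (w.getD i 0) (v.getD i 0))) u).getD k 0 =
      if k < m ∧ k < u.length then PySem.Int.bxor (u.getD k 0) (v.getD k 0) else u.getD k 0 := by
  intro m
  induction m with
  | zero =>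
    intro u
    refine ⟨by simp, ?_⟩
    intro k
    rw [if_neg (by rintro ⟨hb, -⟩; omega)]
    simp
  | succ m ih =>
    intro u
    rw [List.range_succ, List.foldl_append, List.foldl_cons, List.foldl_nil]
    obtain ⟨ihl, ihg⟩ := ih u
    refine ⟨by simpa using ihl, ?_⟩
    intro k
    by_cases hk : k = m
    · subst hk
      by_cases hlt : k < u.length
      · rw [pv_getD_set_self _ _ _ (by rw [ihl]; exact hlt), ihg]
        rw [if_neg (by rintro ⟨hb, -⟩; omega), if_pos ⟨by omega, hlt⟩]
      · rw [List.set_eq_of_length_le (by rw [ihl]; omega), ihg]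
        rw [if_neg (by rintro ⟨-, hd⟩; omega), if_neg (by rintro ⟨-, hd⟩; omega)]
    · rw [pv_getD_set_ne _ _ _ _ (fun h => hk h.symm), ihg]
      have hiff : (k < m ∧ k < u.length) ↔ (k < m + 1 ∧ k < u.length) := by
        constructor
        · rintro ⟨a, b⟩; exact ⟨by omega, b⟩
        · rintro ⟨a, b⟩; exact ⟨by omega, b⟩
      rw [if_congr hiff rfl rfl]

theorem pv_zip_getD (u v : List Int) (k : Nat) (hk : k < u.length) (hk2 : k < v.length) :
    (List.zipWith (fun x y => PySem.Int.bxor x y) u v).getD k 0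
      = PySem.Int.bxor (u.getD k 0) (v.getD k 0) := by
  rw [List.getD_eq_getElem?_getD, List.getElem?_zipWith,
    List.getElem?_eq_getElem hk, List.getElem?_eq_getElem hk2]
  simp [List.getD_eq_getElem?_getD, hk, hk2]

theorem pv_xorfold_zip (u v : List Int) (h : u.length = v.length) :
    (List.range u.length).foldl (fun w i => w.set i (PySem.Int.bxor (w.getD i 0) (v.getD i 0))) u
      = List.zipWith (fun x y => PySem.Int.bxor x y) u v := by
  obtain ⟨hl, hg⟩ := pv_xorfold v u.length u
  apply List.ext_getElem
  · rw [hl]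
    simp [h]
  · intro i h1 h2
    rw [← List.getD_eq_getElem _ 0 h1, ← List.getD_eq_getElem _ 0 h2]
    rw [hl] at h1
    rw [hg i, if_pos ⟨h1, h1⟩]
    rw [pv_zip_getD _ _ _ h1 (by omega)]

-- B's division loop does nothing while the scanned coefficients are 0
theorem pv_bloop (ip : List Int) (L : Nat) (temp : List Int) : ∀ (m : Nat),
    (∀ k, k < m → temp.getD k 0 ≠ 1) →
    (List.range m).foldl (fun r k =>
      if r.getD k 0 = 1 then
        r.take k ++ List.zipWith (fun x y => PySem.Int.bxor x y) (r.drop k) ip ++ r.drop (k + L)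
      else r) temp = temp := by
  intro m
  induction m with
  | zero => intro _; simp
  | succ m ih =>
    intro h
    rw [List.range_succ, List.foldl_append, List.foldl_cons, List.foldl_nil,
      ih (fun k hk => h k (by omega)), if_neg (h m (by omega))]

theorem pv_getD_drop (l : List Int) (d k : Nat) : (l.drop d).getD k 0 = l.getD (d + k) 0 := by
  rw [List.getD_eq_getElem?_getD, List.getD_eq_getElem?_getD, List.getElem?_drop]

-- step and exit equations of A's reduction loop
theorem pv_redA_exit (irr : List Int) (f : Nat) (t : List Int) (h : ¬ irr.length ≤ t.length) :
    redA irr (f + 1) t = t := by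
  rw [redA, if_neg h]

theorem pv_redA_step0 (irr : List Int) (f : Nat) (t : List Int) (hge : irr.length ≤ t.length)
    (h0 : ¬ t.getD 0 0 = 1) : redA irr (f + 1) t = redA irr f (stripA t) := by
  rw [redA, if_pos hge, if_neg h0]

theorem pv_redA_step1 (irr : List Int) (f : Nat) (t : List Int) (hge : irr.length ≤ t.length)
    (h1 : t.getD 0 0 = 1) : redA irr (f + 1) t = redA irr f (stripA
      ((List.range t.length).foldl (fun u i => u.set i (PySem.Int.bxor (u.getD i 0)
        ((List.replicate (t.length - irr.length) 0 ++ irr).getD i 0))) t)) := by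
  rw [redA, if_pos hge, if_pos h1]

-- main equivalence on Pre_
theorem pv_main (p1 p2 ip : List Int) (hpre : Pre_poly_mult_normal p1 p2 ip) :
    poly_mult_normal p1 p2 ip = poly_mult_normal_alt p1 p2 ip := by
  have hAunf : poly_mult_normal p1 p2 ip =
      redA ip ((p1.length + p2.length - 1) + 1)
        ((List.range (p1.length + p2.length - 1)).map (fun k => ((pvConvBit p1 p2 k : Nat) : Int))) := by
    show redA ip ((multA p1 p2).length + 1) (multA p1 p2) = _
    rw [pv_multA_eq]
    simp
  set n0 := p1.length + p2.length - 1 with hn0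
  set T := (List.range n0).map (fun k => ((pvConvBit p1 p2 k : Nat) : Int)) with hTdef
  have hTlen : T.length = n0 := by rw [hTdef]; simp
  have hTget : ∀ k, k < n0 → T.getD k 0 = ((pvConvBit p1 p2 k : Nat) : Int) := by
    intro k hk
    rw [hTdef, List.getD_eq_getElem?_getD, List.getElem?_eq_getElem (by simpa using hk)]
    simp
  rw [hAunf]
  unfold Pre_poly_mult_normal at hpre
  rw [← hn0] at hpre
  by_cases hnL : n0 < ip.length
  · -- no reduction: product shorter than the irreducible
    rw [pv_redA_exit _ _ _ (by rw [hTlen]; omega)]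
    simp only [poly_mult_normal_alt]
    rw [if_pos (show ((p1.length : Int) + (p2.length : Int) - 1) < (ip.length : Int) by omega)]
  · obtain ⟨hL2, hz, htop⟩ := hpre.resolve_left hnL
    have hge : ip.length ≤ n0 := by omega
    set d := n0 - ip.length with hd
    have hzT : ∀ k, k < d → T.getD k 0 = 0 := by
      intro k hk
      rw [hTget k (by omega), hz k hk]
      simp
    have hbit2 : pvConvBit p1 p2 d < 2 := by
      unfold pvConvBit
      omega
    -- B side unfolding, shared by both subcases
    have htn : ((p1.length : Int) + (p2.length : Int) - 1).toNat = n0 := by omega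
    have hBunf : poly_mult_normal_alt p1 p2 ip =
        (if stripB (((List.range (d + 1)).foldl (fun r k =>
            if r.getD k 0 = 1 then
              r.take k ++ List.zipWith (fun x y => PySem.Int.bxor x y) (r.drop k) ip
                ++ r.drop (k + ip.length)
            else r) T).drop (d + 1)) = []
        then [0]
        else stripB (((List.range (d + 1)).foldl (fun r k =>
            if r.getD k 0 = 1 then
              r.take k ++ List.zipWith (fun x y => PySem.Int.bxor x y) (r.drop k) ip
                ++ r.drop (k + ip.length)
            else r) T).drop (d + 1))) := by
      simp only [poly_mult_normal_alt]
      rw [if_neg (show ¬ ((p1.length : Int) + (p2.length : Int) - 1) < (ip.length : Int) by omega)]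
      rw [htn, ← hn0, ← hTdef, ← hd]
    rw [hBunf]
    rcases (by omega : pvConvBit p1 p2 d = 0 ∨ pvConvBit p1 p2 d = 1) with hb | hb
    · -- the stripped product is strictly shorter than the irreducible: strip only
      have hTd : T.getD d 0 = 0 := by
        rw [hTget d (by omega), hb]
        simp
      have hz1 : ∀ k, k < d + 1 → T.getD k 0 = 0 := by
        intro k hk
        rcases Nat.lt_or_ge k d with h | h
        · exact hzT k h
        · have hkd : k = d := by omega
          rw [hkd]
          exact hTd
      have hdrop_ne : T.drop (d + 1) ≠ [] := by
        apply List.ne_nil_of_length_pos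
        rw [List.length_drop, hTlen]
        omega
      have hdecomp : T = List.replicate (d + 1) 0 ++ T.drop (d + 1) :=
        pv_zeros_decomp T (d + 1) hz1 (by rw [hTlen]; omega)
      have hstrip : stripA T = stripB (T.drop (d + 1)) := by
        rw [pv_stripA_eq_stripB]
        conv_lhs => rw [hdecomp]
        exact pv_stripB_replicate _ _ hdrop_ne
      rw [pv_redA_step0 ip n0 T (by rw [hTlen]; omega)
        (by rw [hz1 0 (by omega)]; norm_num)]
      obtain ⟨f, hf⟩ : ∃ f, n0 = f + 1 := ⟨n0 - 1, by omega⟩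
      rw [hstrip, hf, pv_redA_exit _ _ _ (by
        have h1 := pv_stripB_length_le (T.drop (d + 1))
        rw [List.length_drop, hTlen] at h1
        omega)]
      -- B: the division pass scans only zeros and does nothing
      rw [pv_bloop ip ip.length T (d + 1) (fun k hk => by rw [hz1 k hk]; norm_num)]
      rw [if_neg (pv_stripB_ne_nil _ hdrop_ne)]
    · -- the stripped product has exactly the irreducible's length: one aligned XOR, then strip
      have hip0 : ip.getD 0 0 = 1 := htop hb
      have hTd : T.getD d 0 = 1 := by
        rw [hTget d (by omega), hb]
        simp
      have hslen : (T.drop d).length = ip.length := by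
        rw [List.length_drop, hTlen]
        omega
      have hshead : (T.drop d).getD 0 0 = 1 := by
        rw [pv_getD_drop]
        simpa using hTd
      have hwlen : (List.zipWith (fun x y => PySem.Int.bxor x y) (T.drop d) ip).length = ip.length := by
        rw [List.length_zipWith, hslen]
        simp
      have hwhead : (List.zipWith (fun x y => PySem.Int.bxor x y) (T.drop d) ip).getD 0 0 = 0 := by
        rw [pv_zip_getD _ _ 0 (by rw [hslen]; omega) (by omega), hshead, hip0]
        decide
      have hwdrop_ne : (List.zipWith (fun x y => PySem.Int.bxor x y) (T.drop d) ip).drop 1 ≠ [] := by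
        apply List.ne_nil_of_length_pos
        rw [List.length_drop, hwlen]
        omega
      have hwdecomp : (List.zipWith (fun x y => PySem.Int.bxor x y) (T.drop d) ip) =
          List.replicate 1 0 ++ (List.zipWith (fun x y => PySem.Int.bxor x y) (T.drop d) ip).drop 1 :=
        pv_zeros_decomp _ 1 (fun k hk => by
          have hk0 : k = 0 := by omega
          rw [hk0]
          exact hwhead) (by rw [hwlen]; omega)
      have hysw : stripA (List.zipWith (fun x y => PySem.Int.bxor x y) (T.drop d) ip) =
          stripB ((List.zipWith (fun x y => PySem.Int.bxor x y) (T.drop d) ip).drop 1) := by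
        rw [pv_stripA_eq_stripB]
        conv_lhs => rw [hwdecomp]
        exact pv_stripB_replicate _ _ hwdrop_ne
      have hkey : ∀ f, redA ip (f + 2) (T.drop d) =
          stripB ((List.zipWith (fun x y => PySem.Int.bxor x y) (T.drop d) ip).drop 1) := by
        intro f
        rw [pv_redA_step1 ip (f + 1) (T.drop d) hslen.ge hshead]
        have hsh : List.replicate ((T.drop d).length - ip.length) 0 ++ ip = ip := by
          rw [hslen]
          simp
        rw [hsh, pv_xorfold_zip (T.drop d) ip hslen, hysw]
        exact pv_redA_exit _ _ _ (by
          have h1 := pv_stripB_length_le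
            ((List.zipWith (fun x y => PySem.Int.bxor x y) (T.drop d) ip).drop 1)
          rw [List.length_drop, hwlen] at h1
          omega)
      -- A side
      have hAred : redA ip (n0 + 1) T =
          stripB ((List.zipWith (fun x y => PySem.Int.bxor x y) (T.drop d) ip).drop 1) := by
        by_cases hd0 : d = 0
        · obtain ⟨f, hf⟩ : ∃ f, n0 + 1 = f + 2 := ⟨n0 - 1, by omega⟩
          conv_lhs => rw [show T = T.drop d from by rw [hd0, List.drop_zero]]
          rw [hf]
          exact hkey f
        · rw [pv_redA_step0 ip n0 T (by rw [hTlen]; omega)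
            (by rw [hzT 0 (by omega)]; norm_num)]
          have hTne : T.drop d ≠ [] := by
            apply List.ne_nil_of_length_pos
            rw [hslen]
            omega
          have hdecomp2 : T = List.replicate d 0 ++ T.drop d :=
            pv_zeros_decomp T d hzT (by rw [hTlen]; omega)
          obtain ⟨x, rest, hxr⟩ := List.exists_cons_of_ne_nil hTne
          have hx : x = 1 := by
            rw [hxr] at hshead
            simpa using hshead
          have hstripT : stripA T = T.drop d := by
            rw [pv_stripA_eq_stripB]
            conv_lhs => rw [hdecomp2]
            rw [pv_stripB_replicate d _ hTne, hxr,
              pv_stripB_head_ne x rest (by rw [hx]; norm_num)]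
          obtain ⟨f, hf⟩ : ∃ f, n0 = f + 2 := ⟨n0 - 2, by omega⟩
          rw [hstripT, hf]
          exact hkey f
      rw [hAred]
      -- B side: the pass is inert up to position d, then XORs the aligned irreducible once
      rw [List.range_succ, List.foldl_append, List.foldl_cons, List.foldl_nil]
      rw [pv_bloop ip ip.length T d (fun k hk => by rw [hzT k hk]; norm_num)]
      rw [if_pos hTd]
      rw [show d + ip.length = T.length from by rw [hTlen]; omega, List.drop_length,
        List.append_nil]
      have htake : (T.take d).length = d := by
        rw [List.length_take, hTlen]
        omega
      rw [show d + 1 = (T.take d).length + 1 from by rw [htake]]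
      rw [List.drop_length_add_append]
      rw [if_neg (pv_stripB_ne_nil _ hwdrop_ne)]

-- ===== VERDICT (by name: the statement is the Claim_ definition above) =====
theorem poly_mult_normal_spec : Claim_equal_poly_mult_normal := by
  intro p1 p2 ip _ hpre
  unfold Spec_poly_mult_normal
  exact pv_main p1 p2 ip hpre
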